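-- pv_equiv track=rewrite | github.com/dirtysalt/codes | misc/random/pyramidal_number.py | pyramidal_number
-- ===== SOURCE A (Python) =====
-- def pyramidal_number(n, k):
--     dp = [[0] * (k + 1) for _ in range(n + 1)]
--     dp[0][0] = 1
--     for i in range(1, n + 1):
--         j = 2
--         while True:
--             x = (j ** 3 - j) // 6
--             j += 1
--             if x > i:
--                 break
--             if x == i:
--                 dp[i][0] = 1
--             for k2 in range(1, k + 1):
--                 dp[i][k2] = dp[i][k2] or dp[i - x][k2 - 1]
--     ans = 0
--     for i in range(1, n + 1):
--         ok = False
--         for k2 in range(1, k + 1):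
--             if dp[i][k2] == 1:
--                 ok = True
--                 break
--         if ok:
--             ans += 1
--     return ans
-- ===== SOURCE B (Python) =====
-- def pyramidal_number(n, k):
--     if k < 1:
--         return 0
--     # tetrahedral numbers T_j = (j^3-j)/6 up to n, increasing
--     pyr = []
--     j = 2
--     while True:
--         x = (j * j * j - j) // 6
--         if x > n:
--             break
--         pyr.append(x)
--         j += 1
--     INF = n + 2
--     best = [INF] * (n + 1)  # best[i] = minimal number of tetrahedral summands of i
--     best[0] = 0
--     for i in range(1, n + 1):
--         b = INF
--         for x in pyr:
--             if x > i:
--                 break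
--             c = best[i - x] + 1
--             if c < b:
--                 b = c
--         best[i] = b
--     # A's dp[i][0]-seeding effectively admits one extra summand, hence the k+1 bound
--     return sum(1 for i in range(1, n + 1) if best[i] <= k + 1)
-- ===== Notes on version B (the rewrite author's own statement) =====
-- stated objective: faster
-- what changed: B replaces A's (n+1)x(k+1) boolean reachability table (rebuilt column-by-column for every i and k2) with a single min-count DP: it computes once the minimal number of tetrahedral summands best[i] for each i and counts the i with best[i] <= k+1 (the bound A effectively tests, since A's dp[i][0] seeding admits one extra summand); this drops the factor k from the cost.
import Mathlib
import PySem

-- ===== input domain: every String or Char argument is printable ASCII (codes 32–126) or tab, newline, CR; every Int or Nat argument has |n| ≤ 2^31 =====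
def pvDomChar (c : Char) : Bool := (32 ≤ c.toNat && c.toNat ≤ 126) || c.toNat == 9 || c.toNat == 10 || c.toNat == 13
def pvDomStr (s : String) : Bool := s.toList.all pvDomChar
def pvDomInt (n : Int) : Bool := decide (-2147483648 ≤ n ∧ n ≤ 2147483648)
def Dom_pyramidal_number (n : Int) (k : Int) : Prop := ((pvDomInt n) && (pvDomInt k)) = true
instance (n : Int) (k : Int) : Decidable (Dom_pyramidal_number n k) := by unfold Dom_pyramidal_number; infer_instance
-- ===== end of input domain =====

-- B replaces A's (n+1)×(k+1) boolean reachability table by a single min-count table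
-- (minimal number of tetrahedral summands per i), dropping the k factor from the cost.

-- ===== PORT A =====
-- Python's list indexing / item assignment (dp[i][k2] etc.) is ported with Array and
-- .toNat indices; on every input admitted by Pre_ these indices are provably
-- non-negative and in range (outside Pre_, Python A raises IndexError and nothing is
-- claimed), so Array.getD/.setIfInBounds/.modify are exact there.
-- inner 'for k2 in range(1, k+1): dp[i][k2] = dp[i][k2] or dp[i-x][k2-1]'
def pnInner (dp : Array (Array Int)) (i : Int) (x : Int) (k : Int) : Array (Array Int) :=
  (PySem.List.pyRange 1 (k + 1) 1).foldl (fun dp k2 =>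
    let p := dp.getD (i - x).toNat #[]
    dp.modify i.toNat (fun row =>
      row.setIfInBounds k2.toNat
        (if row.getD k2.toNat 0 ≠ 0 then row.getD k2.toNat 0
         else p.getD (k2 - 1).toNat 0))) dp

-- 'while True: x = (j**3-j)//6; j += 1; if x > i: break; …'.  The fuel (i+2) is an upper
-- bound on the number of iterations (x ≥ j-1, so the loop breaks by j = i+3); with that
-- much fuel the recursion returns exactly where Python's break does.
def pnWhile (dp : Array (Array Int)) (i : Int) (k : Int) (j : Int) : Nat → Array (Array Int)
  | 0 => dp
  | fuel + 1 =>
    let x := PySem.Int.floordiv (j ^ 3 - j) 6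
    let j2 := j + 1
    if x > i then dp
    else
      let dp1 := if x == i then dp.modify i.toNat (fun row => row.setIfInBounds 0 1) else dp
      pnWhile (pnInner dp1 i x k) i k j2 fuel

-- 'for k2 in range(1, k+1): if dp[i][k2] == 1: ok = True; break'
def pnOkLoop (row : Array Int) : List Int → Bool
  | [] => false
  | k2 :: rest => if row.getD k2.toNat 0 == 1 then true else pnOkLoop row rest

def pyramidal_number (n : Int) (k : Int) : Int :=
  let dp0 : Array (Array Int) :=
    ((PySem.List.pyRange 0 (n + 1) 1).map
      (fun _ => Array.replicate (k + 1).toNat (0 : Int))).toArray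
  let dp1 := dp0.modify 0 (fun row => row.setIfInBounds 0 1)
  let dp := (PySem.List.pyRange 1 (n + 1) 1).foldl
    (fun dp i => pnWhile dp i k 2 (i + 2).toNat) dp1
  (PySem.List.pyRange 1 (n + 1) 1).foldl (fun (ans : Int) i =>
    if pnOkLoop (dp.getD i.toNat #[]) (PySem.List.pyRange 1 (k + 1) 1)
    then ans + 1 else ans) 0

-- ===== PORT B =====
-- (same Array indexing convention as port A: exact on the inputs admitted by Pre_)
-- 'while True: x = (j*j*j-j)//6; if x > n: break; pyr.append(x); j += 1'; fuel n+2 bounds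
-- the iteration count (x ≥ j-1), so the recursion returns exactly where Python breaks.
def pnPyr (n : Int) (acc : List Int) (j : Int) : Nat → List Int
  | 0 => acc
  | fuel + 1 =>
    let x := PySem.Int.floordiv (j * j * j - j) 6
    if x > n then acc
    else pnPyr n (acc ++ [x]) (j + 1) fuel

-- 'for x in pyr: if x > i: break; c = best[i-x]+1; if c < b: b = c'
def pnMinScan (best : Array Int) (i : Int) (b : Int) : List Int → Int
  | [] => b
  | x :: rest =>
    if x > i then b
    else
      let c := best.getD (i - x).toNat 0 + 1
      pnMinScan best i (if c < b then c else b) rest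

def pyramidal_number_alt (n : Int) (k : Int) : Int :=
  if k < 1 then 0
  else
    let pyr := pnPyr n [] 2 (n + 2).toNat
    let inf := n + 2
    let best0 := (Array.replicate (n + 1).toNat inf).setIfInBounds 0 0
    let best := (PySem.List.pyRange 1 (n + 1) 1).foldl
      (fun best i => best.setIfInBounds i.toNat (pnMinScan best i inf pyr)) best0
    (PySem.List.pyRange 1 (n + 1) 1).foldl (fun (ans : Int) i =>
      if best.getD i.toNat 0 ≤ k + 1 then ans + 1 else ans) 0

-- ===== PRECONDITION & SPEC =====
-- Python A raises IndexError (dp[0][0] on an empty list / empty row) when n < 0 or k < 0.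
def Pre_pyramidal_number (n : Int) (k : Int) : Prop := 0 ≤ n ∧ 0 ≤ k
instance (n : Int) (k : Int) : Decidable (Pre_pyramidal_number n k) := by
  unfold Pre_pyramidal_number; infer_instance
def pvWitness_pyramidal_number : Int × Int := (6, 2)

def Spec_pyramidal_number (n : Int) (k : Int) (out : Int) : Prop := out = pyramidal_number_alt n k
instance (n : Int) (k : Int) (out : Int) : Decidable (Spec_pyramidal_number n k out) := by
  unfold Spec_pyramidal_number; infer_instance

-- ===== CLAIM (what is proved, stated in full; the proofs are below) =====
def Claim_equal_pyramidal_number : Prop := ∀ (n : Int) (k : Int), Dom_pyramidal_number n k → Pre_pyramidal_number n k → Spec_pyramidal_number n k (pyramidal_number n k)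

-- ===== LEMMAS AND PROOFS =====

-- ---- tetrahedral numbers over ℕ ----
def tetN (m : ℕ) : ℕ := ((m + 2) ^ 3 - (m + 2)) / 6

def b2i (b : Bool) : Int := if b then 1 else 0

-- RepB c i = "i is a sum of exactly c tetrahedral numbers"
def RepB : ℕ → Int → Bool
  | 0, i => i == 0
  | c + 1, i => (List.range i.toNat).any fun m =>
      decide ((tetN m : Int) ≤ i) && RepB c (i - (tetN m : Int))

lemma sixDvd (m : ℕ) : 6 ∣ (m + 1) * (m + 2) * (m + 3) := by
  induction m with
  | zero => decide
  | succ m ih =>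
    have h2 : 2 ∣ (m + 2) * (m + 3) := by
      rcases Nat.even_or_odd m with ⟨t, ht⟩ | ⟨t, ht⟩
      · exact ⟨(t + 1) * (t + t + 3), by subst ht; ring⟩
      · exact ⟨(2 * t + 3) * (t + 2), by subst ht; ring⟩
    have : (m + 2) * (m + 3) * (m + 4) = (m + 1) * (m + 2) * (m + 3) + 3 * ((m + 2) * (m + 3)) := by ring
    rw [this]
    exact Nat.dvd_add ih (by obtain ⟨t, ht⟩ := h2; rw [ht]; exact ⟨t, by ring⟩)

lemma tet6 (m : ℕ) : 6 * tetN m = (m + 1) * (m + 2) * (m + 3) := by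
  have he : (m + 2) ^ 3 - (m + 2) = (m + 1) * (m + 2) * (m + 3) := by
    have : (m + 2) ^ 3 = (m + 2) + (m + 1) * (m + 2) * (m + 3) := by ring
    omega
  rw [tetN, he, Nat.mul_div_cancel' (sixDvd m)]

lemma tet_ge (m : ℕ) : m + 1 ≤ tetN m := by
  have h := tet6 m
  have h23 : 6 ≤ (m + 2) * (m + 3) := by nlinarith
  have : 6 * (m + 1) ≤ (m + 1) * (m + 2) * (m + 3) := by
    calc 6 * (m + 1) = (m + 1) * 6 := by ring
    _ ≤ (m + 1) * ((m + 2) * (m + 3)) := Nat.mul_le_mul_left _ h23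
    _ = (m + 1) * (m + 2) * (m + 3) := by ring
  omega

lemma tet_mono {m m' : ℕ} (h : m < m') : tetN m < tetN m' := by
  have h1 := tet6 m
  have h2 := tet6 m'
  have hlt : (m + 1) * (m + 2) * (m + 3) < (m' + 1) * (m' + 2) * (m' + 3) := by
    gcongr <;> omega
  omega

lemma tet_zero : tetN 0 = 1 := by decide

-- the Int expressions of both ports are tetN
lemma xseq_eq_tetA (m : ℕ) : PySem.Int.floordiv (((m : Int) + 2) ^ 3 - ((m : Int) + 2)) 6 = (tetN m : Int) := by
  have hle : (m + 2) ≤ (m + 2) ^ 3 := Nat.le_self_pow (by norm_num) _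
  have h1 : ((m : Int) + 2) ^ 3 - ((m : Int) + 2) = (((m + 2) ^ 3 - (m + 2) : ℕ) : Int) := by
    push_cast [Nat.cast_sub hle]; ring
  rw [h1]
  exact_mod_cast PySem.Int.floordiv_natCast ((m + 2) ^ 3 - (m + 2)) 6

lemma xseq_eq_tetB (m : ℕ) : PySem.Int.floordiv (((m : Int) + 2) * ((m : Int) + 2) * ((m : Int) + 2) - ((m : Int) + 2)) 6 = (tetN m : Int) := by
  have h : ((m : Int) + 2) * ((m : Int) + 2) * ((m : Int) + 2) - ((m : Int) + 2) = ((m : Int) + 2) ^ 3 - ((m : Int) + 2) := by ring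
  rw [h]; exact xseq_eq_tetA m

-- ---- RepB / mintD facts ----
lemma Rep_succ_iff (c : ℕ) (i : Int) :
    RepB (c + 1) i = true ↔ ∃ m : ℕ, (tetN m : Int) ≤ i ∧ RepB c (i - (tetN m : Int)) = true := by
  constructor
  · intro h
    rcases List.any_eq_true.mp h with ⟨m, _, hcond⟩
    simp only [Bool.and_eq_true, decide_eq_true_eq] at hcond
    exact ⟨m, hcond.1, hcond.2⟩
  · rintro ⟨m, h1, h2⟩
    apply List.any_eq_true.mpr
    refine ⟨m, List.mem_range.mpr ?_, by simp [h1, h2]⟩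
    have hge : (m : Int) + 1 ≤ (tetN m : Int) := by exact_mod_cast tet_ge m
    omega

lemma Rep_nonpos_succ {i : Int} (h : i ≤ 0) (c : ℕ) : RepB (c + 1) i = false := by
  have h0 : i.toNat = 0 := by omega
  simp [RepB, h0]

lemma Rep_pos_zero {i : Int} (h : 1 ≤ i) : RepB 0 i = false := by
  simp [RepB]; omega

lemma Rep_self (iN : ℕ) : RepB iN (iN : Int) = true := by
  induction iN with
  | zero => decide
  | succ iN ih =>
    apply (Rep_succ_iff iN (((iN + 1 : ℕ) : Int))).mpr
    refine ⟨0, by rw [tet_zero]; exact_mod_cast Nat.succ_le_succ (Nat.zero_le iN), ?_⟩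
    have harg : (((iN + 1 : ℕ) : Int)) - (tetN 0 : Int) = (iN : Int) := by
      rw [tet_zero]; push_cast; ring
    rw [harg]; exact ih

lemma Rep_nonneg {c : ℕ} {i : Int} (h : RepB c i = true) : 0 ≤ i := by
  cases c with
  | zero => simp [RepB] at h; omega
  | succ c =>
    by_contra hneg
    rw [Rep_nonpos_succ (by omega)] at h
    exact absurd h (by simp)

lemma mint_exists {i : Int} (h : 0 ≤ i) : ∃ c, RepB c i = true := by
  refine ⟨i.toNat, ?_⟩
  have := Rep_self i.toNat
  rwa [Int.toNat_of_nonneg h] at this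

-- minimal number of tetrahedral summands
def mintD (i : Int) : ℕ := if h : 0 ≤ i then Nat.find (mint_exists h) else 0

lemma mint_rep {i : Int} (h : 0 ≤ i) : RepB (mintD i) i = true := by
  unfold mintD
  rw [dif_pos h]
  exact Nat.find_spec (mint_exists h)

lemma mint_min {i : Int} {c : ℕ} (h : RepB c i = true) : mintD i ≤ c := by
  have h0 := Rep_nonneg h
  unfold mintD
  rw [dif_pos h0]
  exact Nat.find_min' _ h

lemma mint_pos {i : Int} (h : 1 ≤ i) : 1 ≤ mintD i := by
  by_contra hc
  have h0 : mintD i = 0 := by omega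
  have := mint_rep (le_trans (by norm_num) h)
  rw [h0, Rep_pos_zero h] at this
  exact absurd this (by simp)

lemma mint_le_self {i : Int} (h : 0 ≤ i) : (mintD i : Int) ≤ i := by
  have hr := Rep_self i.toNat
  rw [Int.toNat_of_nonneg h] at hr
  have hs := mint_min (i := i) (c := i.toNat) hr
  omega

lemma mint_succ_le {i : Int} (hi : 1 ≤ i) (c : ℕ) :
    mintD i ≤ c + 1 ↔ ∃ m : ℕ, (tetN m : Int) ≤ i ∧ mintD (i - (tetN m : Int)) ≤ c := by
  constructor
  · intro h
    have hrep := mint_rep (le_trans (by norm_num) hi)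
    have h1 := mint_pos hi
    obtain ⟨c', hc'⟩ : ∃ c', mintD i = c' + 1 := ⟨mintD i - 1, by omega⟩
    rw [hc'] at hrep
    rcases (Rep_succ_iff c' i).mp hrep with ⟨m, hm1, hm2⟩
    exact ⟨m, hm1, le_trans (mint_min hm2) (by omega)⟩
  · rintro ⟨m, h1, h2⟩
    have h0 : (0 : Int) ≤ i - (tetN m : Int) := by
      by_contra hc
      have := Rep_nonpos_succ (i := i - (tetN m : Int)) (by omega)
      rcases Nat.eq_zero_or_pos (mintD (i - (tetN m : Int))) with hz | hp
      · have := mint_rep (i := i - (tetN m : Int)) ?_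
        · omega
        · omega
      · omega
    have hrep := mint_rep h0
    have : RepB (mintD (i - (tetN m : Int)) + 1) i = true :=
      (Rep_succ_iff _ i).mpr ⟨m, h1, hrep⟩
    have := mint_min this
    omega


-- ---- generic list helpers ----


lemma foldl_min_le_self (l : List Int) (b : Int) : l.foldl min b ≤ b := by
  induction l generalizing b with
  | nil => simp
  | cons x t ih => exact le_trans (ih (min b x)) (min_le_left _ _)

lemma foldl_min_le_mem {l : List Int} {y : Int} (hy : y ∈ l) (b : Int) : l.foldl min b ≤ y := by
  induction l generalizing b with
  | nil => simp at hy
  | cons x t ih =>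
    rcases List.mem_cons.mp hy with h | h
    · subst h; exact le_trans (foldl_min_le_self t (min b y)) (min_le_right _ _)
    · exact ih h _

lemma foldl_min_mem_or (l : List Int) (b : Int) : l.foldl min b = b ∨ l.foldl min b ∈ l := by
  induction l generalizing b with
  | nil => left; rfl
  | cons x t ih =>
    rcases ih (min b x) with h | h
    · rcases min_cases b x with ⟨he, _⟩ | ⟨he, _⟩
      · left; rw [List.foldl_cons, h, he]
      · right; rw [List.foldl_cons, h, he]; exact List.mem_cons_self
    · right; exact List.mem_cons_of_mem _ h

lemma foldl_fixed' (l : List Int) (acc : Int) : l.foldl (fun a _ => a) acc = acc := by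
  induction l with
  | nil => rfl
  | cons x t ih => exact ih

lemma foldl_congr' {f g : Int → Int → Int} (l : List Int) (h : ∀ i ∈ l, ∀ a, f a i = g a i) :
    ∀ acc, l.foldl f acc = l.foldl g acc := by
  induction l with
  | nil => intro acc; rfl
  | cons x t ih =>
    intro acc
    rw [List.foldl_cons, List.foldl_cons, h x List.mem_cons_self]
    exact ih (fun i hi a => h i (List.mem_cons_of_mem _ hi) a) _

lemma any_and_or {α : Type} (l : List α) (p q r : α → Bool) :
    (l.any fun a => p a && (q a || r a)) =
      ((l.any fun a => p a && q a) || (l.any fun a => p a && r a)) := by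
  rw [Bool.eq_iff_iff]
  simp only [List.any_eq_true, Bool.and_eq_true, Bool.or_eq_true]
  constructor
  · rintro ⟨a, ha, hp, hq | hr⟩
    · exact Or.inl ⟨a, ha, hp, hq⟩
    · exact Or.inr ⟨a, ha, hp, hr⟩
  · rintro (⟨a, ha, hp, hq⟩ | ⟨a, ha, hp, hr⟩)
    · exact ⟨a, ha, hp, Or.inl hq⟩
    · exact ⟨a, ha, hp, Or.inr hr⟩




-- ---- array helpers ----
lemma aext_getElem? {α : Type} {a b : Array α} (h : ∀ n : ℕ, a[n]? = b[n]?) : a = b := by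
  apply Array.toList_inj.mp
  apply List.ext_getElem?
  intro n
  rw [Array.getElem?_toList, Array.getElem?_toList]
  exact h n

lemma aset_of_getElem? {α : Type} {a : Array α} {n : ℕ} {v : α} (h : a[n]? = some v) :
    a.setIfInBounds n v = a := by
  obtain ⟨hlt, hv⟩ := Array.getElem?_eq_some_iff.mp h
  apply aext_getElem?
  intro m
  rw [Array.getElem?_setIfInBounds]
  by_cases he : n = m
  · subst he
    rw [if_pos rfl, if_pos hlt, h]
  · rw [if_neg he]

lemma agetElem?_set_self {α : Type} (a : Array α) {n : ℕ} (v : α) (h : n < a.size) :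
    (a.setIfInBounds n v)[n]? = some v := by
  rw [Array.getElem?_setIfInBounds, if_pos rfl, if_pos h]

lemma agetElem?_set_ne {α : Type} (a : Array α) {n m : ℕ} (v : α) (h : n ≠ m) :
    (a.setIfInBounds n v)[m]? = a[m]? := by
  rw [Array.getElem?_setIfInBounds, if_neg h]

lemma amodify_eq_set {α : Type} {a : Array α} {n : ℕ} {v : α} (f : α → α) (h : a[n]? = some v) :
    a.modify n f = a.setIfInBounds n (f v) := by
  obtain ⟨hlt, _⟩ := Array.getElem?_eq_some_iff.mp h
  apply aext_getElem?
  intro m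
  rw [Array.getElem?_modify, Array.getElem?_setIfInBounds]
  by_cases he : n = m
  · subst he
    rw [if_pos rfl, if_pos rfl, if_pos hlt, h]
    rfl
  · rw [if_neg he, if_neg he]

lemma agetD_of_getElem? {α : Type} {a : Array α} {n : ℕ} {v : α} (d : α) (h : a[n]? = some v) :
    a.getD n d = v := by
  rw [Array.getD_eq_getD_getElem?, h]
  rfl

lemma agetD_set_self {α : Type} (a : Array α) {n : ℕ} (v d : α) (h : n < a.size) :
    (a.setIfInBounds n v).getD n d = v :=
  agetD_of_getElem? d (agetElem?_set_self a v h)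

lemma agetD_set_ne {α : Type} (a : Array α) {n m : ℕ} (v d : α) (h : n ≠ m) :
    (a.setIfInBounds n v).getD m d = a.getD m d := by
  rw [Array.getD_eq_getD_getElem?, agetElem?_set_ne a v h, ← Array.getD_eq_getD_getElem?]

lemma ltoArray_getD {α : Type} (l : List α) (n : ℕ) (d : α) :
    (l.toArray).getD n d = l.getD n d := by
  rw [Array.getD_eq_getD_getElem?, List.getElem?_toArray, ← List.getD_eq_getElem?_getD]

-- ---- B side: the pyramidal list ----
lemma tet_mono_le {m m' : ℕ} (h : m ≤ m') : tetN m ≤ tetN m' := by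
  rcases Nat.eq_or_lt_of_le h with he | hl
  · subst he; exact le_refl _
  · exact Nat.le_of_lt (tet_mono hl)

lemma pyr_spec (n : Int) (hn : 0 ≤ n) : ∀ (fuel jm : ℕ) (acc : List Int),
    n.toNat + 2 ≤ jm + fuel →
    acc.Pairwise (· < ·) →
    (∀ a ∈ acc, ∀ m : ℕ, jm ≤ m → a < (tetN m : Int)) →
    (pnPyr n acc ((jm : Int) + 2) fuel).Pairwise (· < ·) ∧
    (∀ x, x ∈ pnPyr n acc ((jm : Int) + 2) fuel ↔
      (x ∈ acc ∨ ∃ m : ℕ, jm ≤ m ∧ (tetN m : Int) = x ∧ x ≤ n)) := by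
  intro fuel
  induction fuel with
  | zero =>
    intro jm acc hfuel hpw hbound
    simp only [pnPyr]
    refine ⟨hpw, fun x => ⟨fun h => Or.inl h, ?_⟩⟩
    rintro (h | ⟨m, hm1, hm2, hm3⟩)
    · exact h
    · exfalso
      have := tet_ge m
      omega
  | succ fuel ih =>
    intro jm acc hfuel hpw hbound
    simp only [pnPyr]
    rw [xseq_eq_tetB jm]
    by_cases hgt : (tetN jm : Int) > n
    · rw [if_pos hgt]
      refine ⟨hpw, fun x => ⟨fun h => Or.inl h, ?_⟩⟩
      rintro (h | ⟨m, hm1, hm2, hm3⟩)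
      · exact h
      · exfalso
        have hmono : (tetN jm : Int) ≤ (tetN m : Int) := by exact_mod_cast tet_mono_le hm1
        omega
    · rw [if_neg hgt]
      have hcast : ((jm : Int) + 2) + 1 = (((jm + 1 : ℕ)) : Int) + 2 := by push_cast; ring
      rw [hcast]
      have hpw' : (acc ++ [(tetN jm : Int)]).Pairwise (· < ·) := by
        rw [List.pairwise_append]
        exact ⟨hpw, List.pairwise_singleton _ _, by
          intro a ha y hy
          rw [List.mem_singleton] at hy
          subst hy
          exact hbound a ha jm (le_refl _)⟩
      have hbound' : ∀ a ∈ acc ++ [(tetN jm : Int)], ∀ m : ℕ, jm + 1 ≤ m → a < (tetN m : Int) := by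
        intro a ha m hm
        rcases List.mem_append.mp ha with h | h
        · exact hbound a h m (by omega)
        · rw [List.mem_singleton] at h
          subst h
          exact_mod_cast tet_mono (by omega : jm < m)
      obtain ⟨ih1, ih2⟩ := ih (jm + 1) (acc ++ [(tetN jm : Int)]) (by omega) hpw' hbound'
      refine ⟨ih1, fun x => ?_⟩
      rw [ih2 x, List.mem_append, List.mem_singleton]
      constructor
      · rintro ((h | h) | ⟨m, hm1, hm2, hm3⟩)
        · exact Or.inl h
        · exact Or.inr ⟨jm, le_refl _, h.symm, by omega⟩
        · exact Or.inr ⟨m, by omega, hm2, hm3⟩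
      · rintro (h | ⟨m, hm1, hm2, hm3⟩)
        · exact Or.inl (Or.inl h)
        · rcases Nat.eq_or_lt_of_le hm1 with he | hl
          · exact Or.inl (Or.inr (by rw [← he] at hm2; exact hm2.symm))
          · exact Or.inr ⟨m, by omega, hm2, hm3⟩

-- ---- B side: the min scan ----
lemma minScan_spec (best : Array Int) (i : Int) : ∀ (l : List Int) (b : Int),
    l.Pairwise (· < ·) →
    pnMinScan best i b l =
      ((l.filter (fun x => decide (x ≤ i))).map
        (fun x => best.getD (i - x).toNat (0 : Int) + 1)).foldl min b := by
  intro l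
  induction l with
  | nil => intro b _; rfl
  | cons x t ih =>
    intro b hp
    rcases List.pairwise_cons.mp hp with ⟨hx, hpt⟩
    by_cases hxi : x > i
    · have hfx : (fun y => decide (y ≤ i)) x = false := by simp; omega
      have hft : t.filter (fun y => decide (y ≤ i)) = [] := by
        apply List.filter_eq_nil_iff.mpr
        intro y hy
        have := hx y hy
        simp; omega
      simp only [pnMinScan, if_pos hxi, List.filter_cons, hfx, hft]
      simp
    · rw [not_lt] at hxi
      have hfx : (fun y => decide (y ≤ i)) x = true := by simp; omega
      simp only [pnMinScan, if_neg (by omega : ¬ x > i), List.filter_cons, hfx]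
      rw [if_pos trivial, ih _ hpt, List.map_cons, List.foldl_cons]
      congr 1
      rcases min_cases b (best.getD (i - x).toNat (0 : Int) + 1) with ⟨he, hc⟩ | ⟨he, hc⟩ <;>
        rw [he] <;> split_ifs <;> omega

-- ---- B side: the best table ----
lemma mint_zero : mintD 0 = 0 := by
  have : RepB 0 (0 : Int) = true := by decide
  have := mint_min this
  omega

lemma best_spec (n : Int) (hn : 1 ≤ n) : ∀ (a : Int), 1 ≤ a → a ≤ n + 1 →
    ∀ best : Array Int, best.size = (n + 1).toNat →
    (∀ i' : ℕ, i' < a.toNat → best[i']? = some ((mintD (i' : Int) : Int))) →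
    (∀ i' : ℕ, a.toNat ≤ i' → i' < (n + 1).toNat → best[i']? = some (n + 2)) →
    ∀ i' : ℕ, i' < (n + 1).toNat →
      ((PySem.List.pyRange a (n + 1) 1).foldl
        (fun best i => best.setIfInBounds i.toNat
          (pnMinScan best i (n + 2) (pnPyr n [] 2 (n + 2).toNat))) best)[i']? =
        some ((mintD (i' : Int) : Int)) := by
  have hpyr := pyr_spec n (by omega) (n + 2).toNat 0 [] (by omega) List.Pairwise.nil
    (by intro a ha; simp at ha)
  rw [show (((0 : ℕ) : Int) + 2) = (2 : Int) by norm_num] at hpyr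
  obtain ⟨Ppw, Pmem⟩ := hpyr
  have H : ∀ d : ℕ, ∀ a : Int, 1 ≤ a → a ≤ n + 1 → (n + 1 - a).toNat = d →
      ∀ best : Array Int, best.size = (n + 1).toNat →
      (∀ i' : ℕ, i' < a.toNat → best[i']? = some ((mintD (i' : Int) : Int))) →
      (∀ i' : ℕ, a.toNat ≤ i' → i' < (n + 1).toNat → best[i']? = some (n + 2)) →
      ∀ i' : ℕ, i' < (n + 1).toNat →
        ((PySem.List.pyRange a (n + 1) 1).foldl
          (fun best i => best.setIfInBounds i.toNat
            (pnMinScan best i (n + 2) (pnPyr n [] 2 (n + 2).toNat))) best)[i']? =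
          some ((mintD (i' : Int) : Int)) := by
    intro d
    induction d with
    | zero =>
      intro a ha1 ha2 hd best hlen hlow hhigh i' hi'
      rw [PySem.List.pyRange_one_eq_nil (by omega), List.foldl_nil]
      exact hlow i' (by omega)
    | succ d ihd =>
      intro a ha1 ha2 hd best hlen hlow hhigh i' hi'
      rw [PySem.List.pyRange_one_cons (by omega : a < n + 1), List.foldl_cons]
      have hbval : ∀ x : Int, 1 ≤ x → x ≤ a →
          best.getD (a - x).toNat (0 : Int) = ((mintD (a - x)) : Int) := by
        intro x h1 h2
        have hcst : (((a - x).toNat : ℕ) : Int) = a - x := by omega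
        have h0 := hlow (a - x).toNat (by omega)
        rw [hcst] at h0
        exact agetD_of_getElem? _ h0
      have hmemF : ∀ x : Int,
          (x ∈ (pnPyr n [] 2 (n + 2).toNat).filter (fun x => decide (x ≤ a))) ↔
          ((∃ m : ℕ, (tetN m : Int) = x) ∧ x ≤ a) := by
        intro x
        rw [List.mem_filter, Pmem x]
        constructor
        · rintro ⟨h1 | ⟨m, _, hm2, _⟩, h2⟩
          · simp at h1
          · exact ⟨⟨m, hm2⟩, by simpa using h2⟩
        · rintro ⟨⟨m, hm⟩, h2⟩
          exact ⟨Or.inr ⟨m, Nat.zero_le m, hm, by omega⟩, by simpa using h2⟩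
      have hscan : pnMinScan best a (n + 2) (pnPyr n [] 2 (n + 2).toNat) =
          ((mintD a) : Int) := by
        rw [minScan_spec best a _ _ Ppw]
        have hx1 : ∀ x : Int, (∃ m : ℕ, (tetN m : Int) = x) → 1 ≤ x := by
          rintro x ⟨m, hm⟩
          have := tet_ge m
          omega
        apply le_antisymm
        · have hps := mint_pos ha1
          obtain ⟨m, hm1, hm2⟩ := (mint_succ_le ha1 (mintD a - 1)).mp (by omega)
          have hxL : (tetN m : Int) ∈
              (pnPyr n [] 2 (n + 2).toNat).filter (fun x => decide (x ≤ a)) :=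
            (hmemF _).mpr ⟨⟨m, rfl⟩, hm1⟩
          have hyM : best.getD (a - (tetN m : Int)).toNat (0 : Int) + 1 ∈
              ((pnPyr n [] 2 (n + 2).toNat).filter (fun x => decide (x ≤ a))).map
                (fun x => best.getD (a - x).toNat (0 : Int) + 1) :=
            List.mem_map.mpr ⟨_, hxL, rfl⟩
          have hle := foldl_min_le_mem hyM (n + 2)
          rw [hbval _ (hx1 _ ⟨m, rfl⟩) hm1] at hle
          omega
        · rcases foldl_min_mem_or
            (((pnPyr n [] 2 (n + 2).toNat).filter (fun x => decide (x ≤ a))).map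
              (fun x => best.getD (a - x).toNat (0 : Int) + 1)) (n + 2) with he | hm
          · rw [he]
            have := mint_le_self (show (0 : Int) ≤ a by omega)
            omega
          · obtain ⟨x, hxL, hxv⟩ := List.mem_map.mp hm
            obtain ⟨⟨m, hmx⟩, hxa⟩ := (hmemF x).mp hxL
            have h1x : (1 : Int) ≤ x := hx1 x ⟨m, hmx⟩
            rw [hbval x h1x hxa] at hxv
            have := (mint_succ_le ha1 (mintD (a - x))).mpr
              ⟨m, by omega, by rw [hmx]⟩
            omega
      rw [hscan]
      have hcast : ((a.toNat : ℕ) : Int) = a := by omega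
      apply ihd (a + 1) (by omega) (by omega) (by omega)
      · rw [Array.size_setIfInBounds]; exact hlen
      · intro i'' hi''
        by_cases he : i'' = a.toNat
        · subst he
          rw [agetElem?_set_self _ _ (by omega), hcast]
        · rw [agetElem?_set_ne _ _ (fun hh => he hh.symm)]
          exact hlow i'' (by omega)
      · intro i'' hi''1 hi''2
        rw [agetElem?_set_ne _ _ (by omega)]
        exact hhigh i'' (by omega) hi''2
      · exact hi'
  exact fun a ha1 ha2 best hlen hlow hhigh i' hi' =>
    H (n + 1 - a).toNat a ha1 ha2 rfl best hlen hlow hhigh i' hi' 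

-- ---- A side: rows ----
def refRowL (k i : Int) : List Int :=
  (List.range (k + 1).toNat).map fun c => b2i (RepB c i || RepB (c + 1) i)

def refRow (k i : Int) : Array Int := (refRowL k i).toArray

def pbit (i : Int) : ℕ → ℕ → Bool
  | 0, jm => (List.range jm).any fun m =>
      decide ((tetN m : Int) ≤ i) && ((tetN m : Int) == i)
  | c + 1, jm => (List.range jm).any fun m =>
      decide ((tetN m : Int) ≤ i) &&
        (RepB c (i - (tetN m : Int)) || RepB (c + 1) (i - (tetN m : Int)))

lemma any_congr' {α : Type} (l : List α) {p q : α → Bool} (h : ∀ a ∈ l, p a = q a) :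
    l.any p = l.any q := by
  induction l with
  | nil => rfl
  | cons x t ih =>
    simp only [List.any_cons, h x List.mem_cons_self,
      ih (fun a ha => h a (List.mem_cons_of_mem _ ha))]

lemma any_range_pad {p : ℕ → Bool} {j1 j2 : ℕ} (h12 : j1 ≤ j2)
    (h : ∀ m, j1 ≤ m → p m = false) :
    (List.range j2).any p = (List.range j1).any p := by
  rw [show j2 = j1 + (j2 - j1) by omega, List.range_add, List.any_append]
  have h2 : ((List.range (j2 - j1)).map (j1 + ·)).any p = false := by
    simp only [List.any_map, List.any_eq_false]
    intro t ht
    simp [Function.comp, h (j1 + t) (by omega)]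
  rw [h2, Bool.or_false]

def prowFL (k i : Int) (jm : ℕ) : List Int :=
  (List.range (k + 1).toNat).map fun c => b2i (pbit i c jm)

def prowF (k i : Int) (jm : ℕ) : Array Int := (prowFL k i jm).toArray

def rstep (p : Array Int) (r : Array Int) (k2 : Int) : Array Int :=
  r.setIfInBounds k2.toNat
    (if r.getD k2.toNat 0 ≠ 0 then r.getD k2.toNat 0
     else p.getD (k2 - 1).toNat 0)

lemma pbit_none (i : Int) (c : ℕ) : pbit i c 0 = false := by
  cases c <;> rfl

lemma prowFL_zero (k i : Int) : prowFL k i 0 = List.replicate (k + 1).toNat 0 := by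
  unfold prowFL
  simp [pbit_none, b2i, List.map_const']

lemma prowF_zero (k i : Int) : prowF k i 0 = Array.replicate (k + 1).toNat 0 := by
  unfold prowF
  rw [prowFL_zero, List.toArray_replicate]

lemma pbit_pad (i : Int) (c : ℕ) {j1 j2 : ℕ} (h12 : j1 ≤ j2)
    (h : ∀ m : ℕ, j1 ≤ m → i < (tetN m : Int)) : pbit i c j2 = pbit i c j1 := by
  cases c with
  | zero =>
    unfold pbit
    apply any_range_pad h12
    intro m hm
    have hlt := h m hm
    have hd : decide ((tetN m : Int) ≤ i) = false := by simp; omega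
    rw [hd, Bool.false_and]
  | succ c =>
    unfold pbit
    apply any_range_pad h12
    intro m hm
    have hlt := h m hm
    have hd : decide ((tetN m : Int) ≤ i) = false := by simp; omega
    rw [hd, Bool.false_and]

lemma beq_shift (i y : Int) : (y == i) = ((i - y) == 0) := by
  rw [Bool.eq_iff_iff]; simp only [beq_iff_eq]; omega

lemma RepB_zero_def (i : Int) : RepB 0 i = (i == 0) := rfl

lemma RepB_succ_def (c : ℕ) (i : Int) : RepB (c + 1) i =
    (List.range i.toNat).any fun m =>
      decide ((tetN m : Int) ≤ i) && RepB c (i - (tetN m : Int)) := rfl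

lemma pbit_zero_def (i : Int) (jm : ℕ) : pbit i 0 jm =
    (List.range jm).any fun m => decide ((tetN m : Int) ≤ i) && ((tetN m : Int) == i) := rfl

lemma pbit_succ_def (i : Int) (c jm : ℕ) : pbit i (c + 1) jm =
    (List.range jm).any fun m =>
      decide ((tetN m : Int) ≤ i) &&
        (RepB c (i - (tetN m : Int)) || RepB (c + 1) (i - (tetN m : Int))) := rfl

lemma prowFL_full {k i : Int} (hi : 1 ≤ i) : prowFL k i i.toNat = refRowL k i := by
  unfold prowFL refRowL
  apply List.map_congr_left
  intro c _
  congr 1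
  cases c with
  | zero =>
    rw [Rep_pos_zero hi, Bool.false_or]
    show pbit i 0 i.toNat = RepB (0 + 1) i
    rw [pbit_zero_def, RepB_succ_def]
    apply any_congr'
    intro m _
    rw [beq_shift]
    rfl
  | succ c' =>
    show pbit i (c' + 1) i.toNat = (RepB (c' + 1) i || RepB (c' + 1 + 1) i)
    rw [pbit_succ_def, any_and_or, RepB_succ_def c' i, RepB_succ_def (c' + 1) i]

lemma prowFL_congr {k i : Int} {j1 j2 : ℕ} (h : ∀ c, pbit i c j1 = pbit i c j2) :
    prowFL k i j1 = prowFL k i j2 := by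
  unfold prowFL
  apply List.map_congr_left
  intro c _
  rw [h c]

lemma prowFL_stable {k i : Int} (hi : 1 ≤ i) {jm : ℕ} (h : i < (tetN jm : Int)) :
    prowFL k i jm = refRowL k i := by
  rcases Nat.lt_or_ge i.toNat jm with hlt | hle
  · have he : prowFL k i jm = prowFL k i i.toNat := by
      apply prowFL_congr
      intro c
      exact pbit_pad i c (Nat.le_of_lt hlt) (fun m hm => by
        have := tet_ge m
        omega)
    rw [he, prowFL_full hi]
  · have he : prowFL k i jm = prowFL k i i.toNat := by
      apply prowFL_congr
      intro c
      exact (pbit_pad i c hle (fun m hm => lt_of_lt_of_le h (by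
        exact_mod_cast tet_mono_le hm))).symm
    rw [he, prowFL_full hi]

lemma prowF_stable {k i : Int} (hi : 1 ≤ i) {jm : ℕ} (h : i < (tetN jm : Int)) :
    prowF k i jm = refRow k i := by
  unfold prowF refRow
  exact congrArg List.toArray (prowFL_stable hi h)

lemma inner_aux (i x k : Int) (p : Array Int) (hi : 1 ≤ i) (hx : 1 ≤ x) (hxi : x ≤ i) :
    ∀ (ks : List Int) (dp : Array (Array Int)) (r : Array Int),
    i.toNat < dp.size →
    dp[i.toNat]? = some r →
    dp.getD (i - x).toNat #[] = p →
    ks.foldl (fun dp k2 =>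
      let p := dp.getD (i - x).toNat #[]
      dp.modify i.toNat (fun row =>
        row.setIfInBounds k2.toNat
          (if row.getD k2.toNat 0 ≠ 0 then row.getD k2.toNat 0
           else p.getD (k2 - 1).toNat 0))) dp
      = dp.setIfInBounds i.toNat (ks.foldl (rstep p) r) := by
  intro ks
  induction ks with
  | nil =>
    intro dp r hlen hrow hp
    exact (aset_of_getElem? hrow).symm
  | cons k2 ks ih =>
    intro dp r hlen hrow hp
    simp only [List.foldl_cons]
    rw [hp, amodify_eq_set _ hrow]
    rw [show r.setIfInBounds k2.toNat
        (if r.getD k2.toNat 0 ≠ 0 then r.getD k2.toNat 0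
         else p.getD (k2 - 1).toNat 0) = rstep p r k2 from rfl]
    have hlen' : i.toNat < (dp.setIfInBounds i.toNat (rstep p r k2)).size := by
      rw [Array.size_setIfInBounds]; exact hlen
    have hrow' : (dp.setIfInBounds i.toNat (rstep p r k2))[i.toNat]? = some (rstep p r k2) :=
      agetElem?_set_self dp _ hlen
    have hp' : (dp.setIfInBounds i.toNat (rstep p r k2)).getD (i - x).toNat #[] = p := by
      rw [agetD_set_ne _ _ _ (by omega : i.toNat ≠ (i - x).toNat)]
      exact hp
    rw [ih _ _ hlen' hrow' hp', Array.setIfInBounds_setIfInBounds]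

lemma pnInner_eq (i x k : Int) (p : Array Int) (hi : 1 ≤ i) (hx : 1 ≤ x) (hxi : x ≤ i)
    (dp : Array (Array Int)) (r : Array Int)
    (hlen : i.toNat < dp.size)
    (hrow : dp[i.toNat]? = some r)
    (hp : dp.getD (i - x).toNat #[] = p) :
    pnInner dp i x k = dp.setIfInBounds i.toNat
      ((PySem.List.pyRange 1 (k + 1) 1).foldl (rstep p) r) := by
  unfold pnInner
  exact inner_aux i x k p hi hx hxi _ dp r hlen hrow hp

lemma rfold_entries (p : Array Int) (k : Int) (hk : 1 ≤ k) :
    ∀ (a : Int), 1 ≤ a → a ≤ k + 1 →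
    ∀ r : Array Int, r.size = (k + 1).toNat →
    (PySem.List.pyRange a (k + 1) 1).foldl (rstep p) r =
      ((List.range (k + 1).toNat).map (fun (c : ℕ) =>
        if (c : Int) < a then r.getD c 0
        else (if r.getD c 0 ≠ 0 then r.getD c 0 else p.getD (c - 1) 0))).toArray := by
  have H : ∀ d : ℕ, ∀ a : Int, 1 ≤ a → a ≤ k + 1 → (k + 1 - a).toNat = d →
      ∀ r : Array Int, r.size = (k + 1).toNat →
      (PySem.List.pyRange a (k + 1) 1).foldl (rstep p) r =
        ((List.range (k + 1).toNat).map (fun (c : ℕ) =>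
          if (c : Int) < a then r.getD c 0
          else (if r.getD c 0 ≠ 0 then r.getD c 0 else p.getD (c - 1) 0))).toArray := by
    intro d
    induction d with
    | zero =>
      intro a ha1 ha2 hd r hr
      rw [PySem.List.pyRange_one_eq_nil (by omega), List.foldl_nil]
      apply aext_getElem?
      intro m
      have hR : (((List.range (k + 1).toNat).map (fun (c : ℕ) =>
          if (c : Int) < a then r.getD c 0
          else (if r.getD c 0 ≠ 0 then r.getD c 0 else p.getD (c - 1) 0))).toArray)[m]? =
          ((List.range (k + 1).toNat).map (fun (c : ℕ) =>
          if (c : Int) < a then r.getD c 0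
          else (if r.getD c 0 ≠ 0 then r.getD c 0 else p.getD (c - 1) 0)))[m]? :=
        List.getElem?_toArray
      rw [hR]
      by_cases hm : m < (k + 1).toNat
      · rw [List.getElem?_map, List.getElem?_range hm, Option.map_some, if_pos (by omega)]
        have hms : m < r.size := by omega
        rw [Array.getElem?_eq_getElem hms, Array.getD_eq_getD_getElem?,
          Array.getElem?_eq_getElem hms]
        rfl
      · rw [List.getElem?_eq_none (by simp; omega), Array.getElem?_eq_none (by omega)]
    | succ d ihd =>
      intro a ha1 ha2 hd r hr
      have hak : a < k + 1 := by omega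
      rw [PySem.List.pyRange_one_cons hak, List.foldl_cons]
      have hr' : (rstep p r a).size = (k + 1).toNat := by
        unfold rstep
        rw [Array.size_setIfInBounds, hr]
      rw [ihd (a + 1) (by omega) (by omega) (by omega) (rstep p r a) hr']
      apply congrArg List.toArray
      apply List.map_congr_left
      intro c hc
      rw [List.mem_range] at hc
      have hal : a.toNat < r.size := by omega
      have hrs : rstep p r a = r.setIfInBounds a.toNat
          (if r.getD a.toNat 0 ≠ 0 then r.getD a.toNat 0 else p.getD (a.toNat - 1) 0) := by
        unfold rstep
        rw [show (a - 1).toNat = a.toNat - 1 by omega]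
      by_cases hca : c = a.toNat
      · rw [hca, if_pos (by omega), if_neg (by omega), hrs, agetD_set_self _ _ _ hal]
      · have hgne : (rstep p r a).getD c 0 = r.getD c 0 := by
          rw [hrs, agetD_set_ne _ _ _ (fun he => hca he.symm)]
        by_cases hlt : (c : Int) < a
        · rw [if_pos (by omega : (c : Int) < a + 1), if_pos hlt, hgne]
        · rw [if_neg (by omega : ¬ (c : Int) < a + 1), if_neg hlt, hgne]
  exact fun a ha1 ha2 r hr => H (k + 1 - a).toNat a ha1 ha2 rfl r hr

lemma map_range_getD (M : ℕ) (f : ℕ → Int) {c : ℕ} (h : c < M) :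
    ((List.range M).map f).getD c 0 = f c := by
  rw [List.getD_eq_getElem?_getD, List.getElem?_map, List.getElem?_range h]
  rfl

lemma size_prowF (k i : Int) (jm : ℕ) : (prowF k i jm).size = (k + 1).toNat := by
  simp [prowF, prowFL]

lemma prowF_getD {k i : Int} (jm : ℕ) {c : ℕ} (h : c < (k + 1).toNat) :
    (prowF k i jm).getD c 0 = b2i (pbit i c jm) := by
  unfold prowF prowFL
  rw [ltoArray_getD, map_range_getD _ _ h]

lemma refRow_getD {k i : Int} {c : ℕ} (h : c < (k + 1).toNat) :
    (refRow k i).getD c 0 = b2i (RepB c i || RepB (c + 1) i) := by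
  unfold refRow refRowL
  rw [ltoArray_getD, map_range_getD _ _ h]

lemma pbit_step (i : Int) (c jm : ℕ) (hle : (tetN jm : Int) ≤ i) :
    pbit i c (jm + 1) =
      (pbit i c jm ||
        (if c = 0 then ((tetN jm : Int) == i)
         else (RepB (c - 1) (i - (tetN jm : Int)) || RepB c (i - (tetN jm : Int))))) := by
  cases c with
  | zero =>
    rw [pbit_zero_def, pbit_zero_def, List.range_succ, List.any_append, if_pos rfl]
    simp [hle]
  | succ c' =>
    rw [pbit_succ_def, pbit_succ_def, List.range_succ, List.any_append,
      if_neg (Nat.succ_ne_zero c')]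
    simp [hle]

lemma whileSpec (k i : Int) (hk : 1 ≤ k) (hi : 1 ≤ i) :
    ∀ (fuel jm : ℕ) (dp : Array (Array Int)),
    i.toNat + 2 ≤ jm + fuel →
    i.toNat < dp.size →
    (∀ i' : ℕ, i' < i.toNat → dp[i']? = some (refRow k (i' : Int))) →
    dp[i.toNat]? = some (prowF k i jm) →
    pnWhile dp i k ((jm : Int) + 2) fuel = dp.setIfInBounds i.toNat (refRow k i) := by
  intro fuel
  induction fuel with
  | zero =>
    intro jm dp hfuel hlen hlow hrow
    have hbig : i < (tetN jm : Int) := by have := tet_ge jm; omega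
    rw [prowF_stable hi hbig] at hrow
    show dp = dp.setIfInBounds i.toNat (refRow k i)
    exact (aset_of_getElem? hrow).symm
  | succ fuel ih =>
    intro jm dp hfuel hlen hlow hrow
    show (if PySem.Int.floordiv (((jm : Int) + 2) ^ 3 - ((jm : Int) + 2)) 6 > i then dp
      else
        pnWhile (pnInner
          (if PySem.Int.floordiv (((jm : Int) + 2) ^ 3 - ((jm : Int) + 2)) 6 == i
           then dp.modify i.toNat (fun row => row.setIfInBounds 0 1)
           else dp) i (PySem.Int.floordiv (((jm : Int) + 2) ^ 3 - ((jm : Int) + 2)) 6) k)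
          i k (((jm : Int) + 2) + 1) fuel) = dp.setIfInBounds i.toNat (refRow k i)
    rw [xseq_eq_tetA jm]
    by_cases hgt : (tetN jm : Int) > i
    · rw [if_pos hgt]
      rw [prowF_stable hi hgt] at hrow
      exact (aset_of_getElem? hrow).symm
    · rw [if_neg hgt]
      have hle : (tetN jm : Int) ≤ i := by omega
      have hx1 : (1 : Int) ≤ (tetN jm : Int) := by have := tet_ge jm; omega
      have hkM : (2 : ℕ) ≤ (k + 1).toNat := by omega
      -- the row after the possible dp[i][0] = 1 assignment
      set r1 : Array Int := (if ((tetN jm : Int) == i)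
          then (prowF k i jm).setIfInBounds 0 1 else prowF k i jm) with hr1
      have hdp1 : (if ((tetN jm : Int) == i)
          then dp.modify i.toNat (fun row => row.setIfInBounds 0 1)
          else dp) = dp.setIfInBounds i.toNat r1 := by
        rw [hr1]
        by_cases he : ((tetN jm : Int) == i)
        · rw [if_pos he, if_pos he, amodify_eq_set _ hrow]
        · rw [if_neg he, if_neg he]
          exact (aset_of_getElem? hrow).symm
      rw [hdp1]
      have hr1size : r1.size = (k + 1).toNat := by
        rw [hr1]
        by_cases he : ((tetN jm : Int) == i)
        · rw [if_pos he, Array.size_setIfInBounds, size_prowF]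
        · rw [if_neg he, size_prowF]
      have hr1get0 : r1.getD 0 0 = b2i (pbit i 0 (jm + 1)) := by
        rw [pbit_step i 0 jm hle, if_pos rfl]
        by_cases he : ((tetN jm : Int) == i)
        · rw [hr1, if_pos he, agetD_set_self _ _ _ (by rw [size_prowF]; omega), he]
          simp [b2i]
        · have he' : ((tetN jm : Int) == i) = false := by simpa using he
          rw [hr1, if_neg he, prowF_getD _ (by omega), he']
          simp [b2i]
      have hr1getS : ∀ c' : ℕ, c' + 1 < (k + 1).toNat →
          r1.getD (c' + 1) 0 = b2i (pbit i (c' + 1) jm) := by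
        intro c' hc'
        have hbase : (prowF k i jm).getD (c' + 1) 0 = b2i (pbit i (c' + 1) jm) :=
          prowF_getD _ hc'
        rw [hr1]
        by_cases he : ((tetN jm : Int) == i)
        · rw [if_pos he, agetD_set_ne _ _ _ (by omega : (0 : ℕ) ≠ c' + 1), hbase]
        · rw [if_neg he, hbase]
      -- the source row read by the inner loop
      have hixnat : (((i - (tetN jm : Int)).toNat : ℕ) : Int) = i - (tetN jm : Int) := by omega
      have hplow := hlow (i - (tetN jm : Int)).toNat (by omega)
      rw [hixnat] at hplow
      have hp : (dp.setIfInBounds i.toNat r1).getD (i - (tetN jm : Int)).toNat #[] =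
          refRow k (i - (tetN jm : Int)) := by
        rw [agetD_set_ne _ _ _ (by omega : i.toNat ≠ (i - (tetN jm : Int)).toNat)]
        exact agetD_of_getElem? _ hplow
      have hinner := pnInner_eq i (tetN jm : Int) k (refRow k (i - (tetN jm : Int))) hi hx1
        (by omega) (dp.setIfInBounds i.toNat r1) r1
        (by rw [Array.size_setIfInBounds]; exact hlen)
        (agetElem?_set_self dp _ hlen)
        hp
      rw [hinner, rfold_entries _ k hk 1 (by omega) (by omega) r1 hr1size]
      -- the merged row is exactly the partial row after scanning index jm
      have hmergeL : (List.range (k + 1).toNat).map (fun (c : ℕ) =>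
          if (c : Int) < 1 then r1.getD c 0
          else (if r1.getD c 0 ≠ 0 then r1.getD c 0
                else (refRow k (i - (tetN jm : Int))).getD (c - 1) 0)) =
          prowFL k i (jm + 1) := by
        unfold prowFL
        apply List.map_congr_left
        intro c hc
        rw [List.mem_range] at hc
        cases c with
        | zero =>
          rw [if_pos (by norm_num)]
          exact hr1get0
        | succ c' =>
          rw [if_neg (by omega), Nat.add_sub_cancel, hr1getS c' hc,
            refRow_getD (by omega : c' < (k + 1).toNat),
            pbit_step i (c' + 1) jm hle, if_neg (Nat.succ_ne_zero c'), Nat.add_sub_cancel]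
          cases hpb : pbit i (c' + 1) jm
          · simp [b2i]
          · simp [b2i]
      have hmerge : ((List.range (k + 1).toNat).map (fun (c : ℕ) =>
          if (c : Int) < 1 then r1.getD c 0
          else (if r1.getD c 0 ≠ 0 then r1.getD c 0
                else (refRow k (i - (tetN jm : Int))).getD (c - 1) 0))).toArray =
          prowF k i (jm + 1) := by
        unfold prowF
        exact congrArg List.toArray hmergeL
      rw [hmerge, Array.setIfInBounds_setIfInBounds]
      have hcast : (((jm : Int) + 2) + 1) = (((jm + 1 : ℕ)) : Int) + 2 := by push_cast; ring
      rw [hcast]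
      have hres := ih (jm + 1) (dp.setIfInBounds i.toNat (prowF k i (jm + 1))) (by omega)
        (by rw [Array.size_setIfInBounds]; exact hlen)
        (by
          intro i' hi'
          rw [agetElem?_set_ne _ _ (by omega)]
          exact hlow i' hi')
        (agetElem?_set_self dp _ hlen)
      rw [hres, Array.setIfInBounds_setIfInBounds]

lemma outerSpec (n k : Int) (hn : 1 ≤ n) (hk : 1 ≤ k) : ∀ (a : Int), 1 ≤ a → a ≤ n + 1 →
    ∀ dp : Array (Array Int), dp.size = (n + 1).toNat →
    (∀ i' : ℕ, i' < a.toNat → dp[i']? = some (refRow k (i' : Int))) →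
    (∀ i' : ℕ, a.toNat ≤ i' → i' < (n + 1).toNat →
      dp[i']? = some (Array.replicate (k + 1).toNat 0)) →
    ∀ i' : ℕ, i' < (n + 1).toNat →
      ((PySem.List.pyRange a (n + 1) 1).foldl
        (fun dp i => pnWhile dp i k 2 (i + 2).toNat) dp)[i']? =
        some (refRow k (i' : Int)) := by
  have H : ∀ d : ℕ, ∀ a : Int, 1 ≤ a → a ≤ n + 1 → (n + 1 - a).toNat = d →
      ∀ dp : Array (Array Int), dp.size = (n + 1).toNat →
      (∀ i' : ℕ, i' < a.toNat → dp[i']? = some (refRow k (i' : Int))) →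
      (∀ i' : ℕ, a.toNat ≤ i' → i' < (n + 1).toNat →
        dp[i']? = some (Array.replicate (k + 1).toNat 0)) →
      ∀ i' : ℕ, i' < (n + 1).toNat →
        ((PySem.List.pyRange a (n + 1) 1).foldl
          (fun dp i => pnWhile dp i k 2 (i + 2).toNat) dp)[i']? =
          some (refRow k (i' : Int)) := by
    intro d
    induction d with
    | zero =>
      intro a ha1 ha2 hd dp hlen hlow hhigh i' hi'
      rw [PySem.List.pyRange_one_eq_nil (by omega), List.foldl_nil]
      exact hlow i' (by omega)
    | succ d ihd =>
      intro a ha1 ha2 hd dp hlen hlow hhigh i' hi'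
      rw [PySem.List.pyRange_one_cons (by omega : a < n + 1), List.foldl_cons]
      have hw := whileSpec k a hk ha1 (a + 2).toNat 0 dp (by omega) (by omega)
        (fun i'' hi'' => hlow i'' hi'')
        (by rw [prowF_zero]; exact hhigh a.toNat (le_refl _) (by omega))
      rw [show (((0 : ℕ) : Int) + 2) = (2 : Int) by norm_num] at hw
      rw [hw]
      have hcast : ((a.toNat : ℕ) : Int) = a := by omega
      apply ihd (a + 1) (by omega) (by omega) (by omega)
      · rw [Array.size_setIfInBounds]; exact hlen
      · intro i'' hi''
        by_cases he : i'' = a.toNat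
        · subst he
          rw [agetElem?_set_self _ _ (by omega), hcast]
        · rw [agetElem?_set_ne _ _ (fun hh => he hh.symm)]
          exact hlow i'' (by omega)
      · intro i'' hi''1 hi''2
        rw [agetElem?_set_ne _ _ (by omega)]
        exact hhigh i'' (by omega) hi''2
      · exact hi'
  exact fun a ha1 ha2 dp hlen hlow hhigh i' hi' =>
    H (n + 1 - a).toNat a ha1 ha2 rfl dp hlen hlow hhigh i' hi'

-- ---- final counting ----
lemma okLoop_any (row : Array Int) : ∀ ks : List Int,
    pnOkLoop row ks = ks.any (fun k2 => row.getD k2.toNat (0 : Int) == 1) := by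
  intro ks
  induction ks with
  | nil => rfl
  | cons k2 rest ih =>
    simp only [pnOkLoop, List.any_cons]
    by_cases h : row.getD k2.toNat (0 : Int) == 1
    · rw [if_pos h, h, Bool.true_or]
    · have h' : (row.getD k2.toNat (0 : Int) == 1) = false := by simpa using h
      rw [if_neg h, ih, h', Bool.false_or]

lemma b2i_eq_one (b : Bool) : (b2i b == 1) = b := by cases b <;> rfl

lemma ok_bridge {i k : Int} (hi : 1 ≤ i) (hk : 1 ≤ k) :
    ((PySem.List.pyRange 1 (k + 1) 1).any
      (fun k2 => (refRow k i).getD k2.toNat (0 : Int) == 1)) = true ↔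
      (mintD i : Int) ≤ k + 1 := by
  rw [List.any_eq_true]
  constructor
  · rintro ⟨k2, hk2, hcond⟩
    rw [PySem.List.mem_pyRange_one] at hk2
    rw [refRow_getD (by omega : k2.toNat < (k + 1).toNat), b2i_eq_one,
      Bool.or_eq_true] at hcond
    rcases hcond with h | h
    · have := mint_min h
      omega
    · have := mint_min h
      omega
  · intro hle
    have hi0 : (0 : Int) ≤ i := by omega
    have hpos := mint_pos hi
    have hrep := mint_rep hi0
    by_cases h1 : mintD i = 1
    · refine ⟨1, PySem.List.mem_pyRange_one.mpr (by omega), ?_⟩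
      rw [refRow_getD (by omega : (1 : Int).toNat < (k + 1).toNat), b2i_eq_one,
        Bool.or_eq_true]
      left
      rw [show ((1 : Int).toNat) = 1 by rfl, ← h1]
      exact hrep
    · refine ⟨(mintD i : Int) - 1, PySem.List.mem_pyRange_one.mpr (by omega), ?_⟩
      rw [refRow_getD (by omega : ((mintD i : Int) - 1).toNat < (k + 1).toNat), b2i_eq_one,
        Bool.or_eq_true]
      right
      have ht : ((mintD i : Int) - 1).toNat + 1 = mintD i := by omega
      rw [ht]
      exact hrep

-- ---- assembling the two programs ----
lemma countA (n k : Int) (hk : 1 ≤ k) (DP : Array (Array Int))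
    (hDP : ∀ i' : ℕ, i' < (n + 1).toNat → DP[i']? = some (refRow k (i' : Int))) :
    (PySem.List.pyRange 1 (n + 1) 1).foldl (fun (ans : Int) i =>
      if pnOkLoop (DP.getD i.toNat #[]) (PySem.List.pyRange 1 (k + 1) 1)
      then ans + 1 else ans) (0 : Int) =
    (PySem.List.pyRange 1 (n + 1) 1).foldl (fun (ans : Int) i =>
      if ((mintD i : ℕ) : Int) ≤ k + 1 then ans + 1 else ans) (0 : Int) := by
  apply foldl_congr'
  intro i hi a
  have hmem := PySem.List.mem_pyRange_one.mp hi
  have hcast : ((i.toNat : ℕ) : Int) = i := by omega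
  have hrow : DP.getD i.toNat #[] = refRow k i := by
    have h0 := hDP i.toNat (by omega)
    rw [hcast] at h0
    exact agetD_of_getElem? _ h0
  rw [hrow, okLoop_any]
  by_cases hc : ((mintD i : ℕ) : Int) ≤ k + 1
  · rw [if_pos ((ok_bridge (by omega) hk).mpr hc), if_pos hc]
  · rw [if_neg (fun hh => hc ((ok_bridge (by omega) hk).mp hh)), if_neg hc]

lemma countB (n k : Int) (BF : Array Int)
    (hBF : ∀ i' : ℕ, i' < (n + 1).toNat → BF[i']? = some ((mintD (i' : Int) : Int))) :
    (PySem.List.pyRange 1 (n + 1) 1).foldl (fun (ans : Int) i =>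
      if BF.getD i.toNat (0 : Int) ≤ k + 1 then ans + 1 else ans) (0 : Int) =
    (PySem.List.pyRange 1 (n + 1) 1).foldl (fun (ans : Int) i =>
      if ((mintD i : ℕ) : Int) ≤ k + 1 then ans + 1 else ans) (0 : Int) := by
  apply foldl_congr'
  intro i hi a
  have hmem := PySem.List.mem_pyRange_one.mp hi
  have hcast : ((i.toNat : ℕ) : Int) = i := by omega
  have hval : BF.getD i.toNat (0 : Int) = ((mintD i : ℕ) : Int) := by
    have h0 := hBF i.toNat (by omega)
    rw [hcast] at h0
    exact agetD_of_getElem? _ h0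
  rw [hval]

lemma countA_zero (l : List Int) (dp : Array (Array Int)) (k : Int) (hk : k < 1) :
    l.foldl (fun (ans : Int) i =>
      if pnOkLoop (dp.getD i.toNat #[]) (PySem.List.pyRange 1 (k + 1) 1)
      then ans + 1 else ans) (0 : Int) = 0 := by
  rw [PySem.List.pyRange_one_eq_nil (show k + 1 ≤ 1 by omega)]
  have h : ∀ i ∈ l, ∀ a : Int,
      (if pnOkLoop (dp.getD i.toNat #[]) ([] : List Int)
       then a + 1 else a) = (fun (a : Int) (_ : Int) => a) a i := by
    intro i _ a
    show (if false = true then a + 1 else a) = a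
    simp
  rw [foldl_congr' l h 0, foldl_fixed']

lemma A_k_nonpos (n k : Int) (hk : k < 1) : pyramidal_number n k = 0 := by
  unfold pyramidal_number
  exact countA_zero _ _ _ hk

lemma e0_eq_refRow (k : Int) (hk : 0 ≤ k) :
    (Array.replicate (k + 1).toNat (0 : Int)).setIfInBounds 0 1 = refRow k 0 := by
  apply aext_getElem?
  intro m
  have hR : (refRow k 0)[m]? =
      ((List.range (k + 1).toNat).map (fun c => b2i (RepB c 0 || RepB (c + 1) 0)))[m]? := by
    unfold refRow refRowL
    exact List.getElem?_toArray
  rw [Array.getElem?_setIfInBounds, hR]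
  by_cases hm : m < (k + 1).toNat
  · rw [List.getElem?_map, List.getElem?_range hm, Option.map_some]
    by_cases h0 : (0 : ℕ) = m
    · rw [if_pos h0, if_pos (by rw [Array.size_replicate]; omega), ← h0]
      norm_num [b2i, RepB_zero_def]
    · rw [if_neg h0, Array.getElem?_replicate, if_pos hm]
      obtain ⟨m', rfl⟩ : ∃ m', m = m' + 1 := ⟨m - 1, by omega⟩
      rw [Rep_nonpos_succ (le_refl 0) m', Rep_nonpos_succ (le_refl 0) (m' + 1)]
      simp [b2i]
  · rw [List.getElem?_eq_none (by simp; omega), if_neg (by omega),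
      Array.getElem?_replicate, if_neg (by omega)]

lemma A_main (n k : Int) (hn : 1 ≤ n) (hk : 1 ≤ k) :
    pyramidal_number n k =
    (PySem.List.pyRange 1 (n + 1) 1).foldl (fun (ans : Int) i =>
      if ((mintD i : ℕ) : Int) ≤ k + 1 then ans + 1 else ans) (0 : Int) := by
  have hdp0 : (PySem.List.pyRange 0 (n + 1) 1).map
      (fun _ => Array.replicate (k + 1).toNat (0 : Int)) =
      List.replicate (n + 1).toNat (Array.replicate (k + 1).toNat (0 : Int)) := by
    apply List.eq_replicate_iff.mpr
    refine ⟨by rw [List.length_map, PySem.List.length_pyRange_one]; norm_num, ?_⟩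
    intro b hb
    rcases List.mem_map.mp hb with ⟨_, _, hbe⟩
    exact hbe.symm
  have h00 : (((PySem.List.pyRange 0 (n + 1) 1).map
      (fun _ => Array.replicate (k + 1).toNat (0 : Int))).toArray)[(0 : ℕ)]? =
      some (Array.replicate (k + 1).toNat (0 : Int)) := by
    rw [List.getElem?_toArray, hdp0, List.getElem?_replicate, if_pos (by omega)]
  have hdp1 : (((PySem.List.pyRange 0 (n + 1) 1).map
      (fun _ => Array.replicate (k + 1).toNat (0 : Int))).toArray).modify 0
        (fun row => row.setIfInBounds 0 1) =
      ((List.replicate (n + 1).toNat (Array.replicate (k + 1).toNat (0 : Int))).toArray).setIfInBounds 0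
        (refRow k 0) := by
    rw [amodify_eq_set _ h00, e0_eq_refRow k (by omega), hdp0]
  show (PySem.List.pyRange 1 (n + 1) 1).foldl _ (0 : Int) = _
  rw [hdp1]
  apply countA n k hk
  apply outerSpec n k hn hk 1 (by norm_num) (by omega)
  · rw [Array.size_setIfInBounds, List.size_toArray, List.length_replicate]
  · intro i' hi'
    have : i' = 0 := by omega
    subst this
    rw [agetElem?_set_self _ _ (by simp; omega)]
    norm_num
  · intro i' hi'1 hi'2
    rw [agetElem?_set_ne _ _ (by omega), List.getElem?_toArray, List.getElem?_replicate,
      if_pos hi'2]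

lemma B_main (n k : Int) (hn : 1 ≤ n) (hk : 1 ≤ k) :
    pyramidal_number_alt n k =
    (PySem.List.pyRange 1 (n + 1) 1).foldl (fun (ans : Int) i =>
      if ((mintD i : ℕ) : Int) ≤ k + 1 then ans + 1 else ans) (0 : Int) := by
  unfold pyramidal_number_alt
  rw [if_neg (by omega)]
  show (PySem.List.pyRange 1 (n + 1) 1).foldl _ (0 : Int) = _
  apply countB n k
  apply best_spec n hn 1 (by norm_num) (by omega)
  · rw [Array.size_setIfInBounds, Array.size_replicate]
  · intro i' hi'
    have : i' = 0 := by omega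
    subst this
    rw [agetElem?_set_self _ _ (by rw [Array.size_replicate]; omega)]
    norm_num [mint_zero]
  · intro i' hi'1 hi'2
    rw [agetElem?_set_ne _ _ (by omega), Array.getElem?_replicate, if_pos hi'2]

-- ===== VERDICT (by name: the statement is the Claim_ definition above) =====
theorem pyramidal_number_spec : Claim_equal_pyramidal_number := by
  unfold Claim_equal_pyramidal_number
  intro n k _ hpre
  obtain ⟨hn, hk⟩ := hpre
  unfold Spec_pyramidal_number
  by_cases hk1 : k < 1
  · rw [A_k_nonpos n k hk1]
    unfold pyramidal_number_alt
    rw [if_pos hk1]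
  · by_cases hn1 : n < 1
    · have hA : pyramidal_number n k = 0 := by
        unfold pyramidal_number
        rw [PySem.List.pyRange_one_eq_nil (show n + 1 ≤ 1 by omega)]
        rfl
      have hB : pyramidal_number_alt n k = 0 := by
        unfold pyramidal_number_alt
        rw [if_neg hk1, PySem.List.pyRange_one_eq_nil (show n + 1 ≤ 1 by omega)]
        rfl
      rw [hA, hB]
    · rw [A_main n k (by omega) (by omega), B_main n k (by omega) (by omega)]
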